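-- pv_equiv track=rewrite | github.com/federicomassa/racecar_2d | racecar_2d/sim2d.py | get_sweeping
-- ===== SOURCE A (Python) =====
-- def get_sweeping(vector, index=-1, interval=-1):
--     """
--     Helper method to retrieve a sweep order given a vector, an index hint around which to check something, possibly an interval around which to look
--     E.g. vector of len 10 --> get_sweeping(vector, 2, 4) = [2, 1, 3, 0, 4, 9, 5, 8, 6], a list of indexes that expands around the index
--
--     Parameters
--     -------------
--     vector: list or tuple
--         The vector of which to get the sweep
--     index: int, optional
--         The optional index hint around which to sweep
--     interval: int, optional (if index is not provided this is not used)
--         Interval around the index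
--     """
--
--     if index == None:
--         index = -1
--     if interval == None:
--         interval = -1
--
--     index_provided = index >= 0
--     interval_provided = interval >= 0
--
--     sweep = []
--     if not index_provided and not interval_provided:
--         sweep = [i for i in range(len(vector))]
--     elif index_provided:
--         # How many points does the sweep contain? Interval is on the left and on the right of the index
--         if interval_provided:
--             npoints = interval*2 + 1
--         else:
--             npoints = len(vector)
--
--         current_index = index
--         current_step = 1
--         current_sign = -1
--         sweep.append(current_index)
--         for i in range(npoints-1):
--             current_index += current_step*current_sign
--             current_step += 1
--             current_sign = -current_sign
--
--             actual_index = current_index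
--             if current_index < 0:
--                 actual_index = len(vector) + current_index
--             elif current_index >= len(vector):
--                 actual_index = current_index - len(vector)
--
--             sweep.append(actual_index)
--
--     return sweep
-- ===== SOURCE B (Python) =====
-- def get_sweeping(vector, index=-1, interval=-1):
--     if index is None:
--         index = -1
--     if interval is None:
--         interval = -1
--     n = len(vector)
--     if index < 0:
--         return list(range(n)) if interval < 0 else []
--     npoints = interval * 2 + 1 if interval >= 0 else n
--
--     def slot(k):
--         # closed-form raw index of the k-th sweep position (k >= 1):
--         # offset (k+1)//2, going left for odd k, right for even k
--         off = (k + 1) // 2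
--         r = index - off if k % 2 == 1 else index + off
--         if r < 0:
--             return r + n
--         if r >= n:
--             return r - n
--         return r
--
--     return [index] + [slot(k) for k in range(1, npoints)]
-- ===== Notes on version B (the rewrite author's own statement) =====
-- stated objective: alternative
-- what changed: Replaces A's stateful walker (mutating current_index/current_step/current_sign each iteration) with a stateless closed-form position formula: the k-th sweep slot is index -/+ (k+1)//2 by parity of k, generated by a comprehension over range(1, npoints) with the same one-shot wrap adjustment.
import Mathlib
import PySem

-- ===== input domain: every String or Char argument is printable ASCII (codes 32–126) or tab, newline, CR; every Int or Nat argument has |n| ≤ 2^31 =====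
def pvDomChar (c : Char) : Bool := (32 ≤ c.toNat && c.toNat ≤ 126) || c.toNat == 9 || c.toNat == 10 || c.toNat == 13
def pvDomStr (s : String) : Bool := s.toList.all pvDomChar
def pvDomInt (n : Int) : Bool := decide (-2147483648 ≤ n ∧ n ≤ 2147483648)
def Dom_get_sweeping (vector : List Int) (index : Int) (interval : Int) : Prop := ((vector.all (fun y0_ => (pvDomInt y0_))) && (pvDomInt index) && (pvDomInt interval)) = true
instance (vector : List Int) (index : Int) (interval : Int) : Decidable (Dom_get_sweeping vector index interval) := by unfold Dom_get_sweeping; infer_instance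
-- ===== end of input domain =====

-- B replaces A's stateful walker (current_index/step/sign mutation) with a stateless
-- closed-form offset formula per position; objective: alternative decomposition, same cost.


-- ===== PORT A =====
-- A's in-loop adjustment: actual_index = len+ci if ci<0, ci-len if ci>=len, else ci
def pyAdjA (n r : Int) : Int :=
  if r < 0 then n + r else if r ≥ n then r - n else r

-- A's for-loop over range(npoints-1), state (current_index, current_step, current_sign)
def loopA (n : Int) : Nat → Int → Int → Int → List Int
  | 0, _, _, _ => []
  | m + 1, ci, step, sign =>
    let ci' := ci + step * sign
    pyAdjA n ci' :: loopA n m ci' (step + 1) (-sign)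

def get_sweeping (vector : List Int) (index : Int) (interval : Int) : List Int :=
  let index_provided := index ≥ 0
  let interval_provided := interval ≥ 0
  if ¬ index_provided ∧ ¬ interval_provided then
    (List.range vector.length).map Int.ofNat
  else if index_provided then
    let npoints : Int := if interval_provided then interval * 2 + 1 else (vector.length : Int)
    index :: loopA (vector.length : Int) (npoints - 1).toNat index 1 (-1)
  else []

-- ===== PORT B =====
-- B's slot(k): closed-form raw index of the k-th position, then the one-shot adjustment
def slotB (n index : Int) (k : Nat) : Int :=
  let off : Int := ((k + 1) / 2 : Nat)
  let r : Int := if k % 2 == 1 then index - off else index + off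
  if r < 0 then r + n else if r ≥ n then r - n else r

def get_sweeping_alt (vector : List Int) (index : Int) (interval : Int) : List Int :=
  let n : Int := vector.length
  if index < 0 then
    if interval < 0 then (List.range vector.length).map Int.ofNat else []
  else
    let npoints : Int := if interval ≥ 0 then interval * 2 + 1 else n
    -- [index] + [slot(k) for k in range(1, npoints)]
    index :: (List.range (npoints - 1).toNat).map (fun j => slotB n index (j + 1))

-- ===== PRECONDITION & SPEC =====
def Spec_get_sweeping (vector : List Int) (index : Int) (interval : Int) (out : List Int) : Prop := out = get_sweeping_alt vector index interval
instance (vector : List Int) (index : Int) (interval : Int) (out : List Int) : Decidable (Spec_get_sweeping vector index interval out) := by unfold Spec_get_sweeping; infer_instance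

-- ===== CLAIM (what is proved, stated in full; the proofs are below) =====
def Claim_equal_get_sweeping : Prop := ∀ (vector : List Int) (index : Int) (interval : Int), Dom_get_sweeping vector index interval → Spec_get_sweeping vector index interval (get_sweeping vector index interval)

-- ===== LEMMAS AND PROOFS =====
-- raw index emitted by loopA at relative position j when entered with state (ci, s, -1)
def rawOf (ci s : Int) (j : Nat) : Int :=
  if j % 2 == 0 then ci - s - (j / 2 : Nat) else ci + 1 + (j / 2 : Nat)

theorem rawOf_shift (ci s : Int) (j : Nat) :
    rawOf ci s (j + 2) = rawOf (ci + 1) (s + 2) j := by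
  unfold rawOf
  have h2 : (j + 2) % 2 = j % 2 := by omega
  have h3 : ((j + 2) / 2 : Nat) = (j / 2 : Nat) + 1 := by omega
  rcases Nat.even_or_odd j with h | h
  · have : j % 2 = 0 := Nat.even_iff.mp h
    simp [h2, h3, this]; ring
  · have : j % 2 = 1 := Nat.odd_iff.mp h
    simp [h2, h3, this]; ring

theorem loopA_closed (n : Int) :
    ∀ m ci s, loopA n m ci s (-1) =
      (List.range m).map (fun j => pyAdjA n (rawOf ci s j)) := by
  have key : ∀ m, (∀ ci s, loopA n m ci s (-1) =
        (List.range m).map (fun j => pyAdjA n (rawOf ci s j))) ∧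
      (∀ ci s, loopA n (m + 1) ci s (-1) =
        (List.range (m + 1)).map (fun j => pyAdjA n (rawOf ci s j))) := by
    intro m
    induction m with
    | zero =>
      refine ⟨fun ci s => rfl, fun ci s => ?_⟩
      show pyAdjA n (ci + s * (-1)) :: loopA n 0 (ci + s * (-1)) (s + 1) (-(-1)) = _
      have e : ci + s * (-1) = ci - s := by ring
      have e0 : rawOf ci s 0 = ci - s := by unfold rawOf; norm_num
      rw [e]
      simp [loopA, List.range_succ, e0]
    | succ k ih =>
      refine ⟨ih.2, ?_⟩
      intro ci s
      have h1 : loopA n (k + 2) ci s (-1)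
          = pyAdjA n (ci - s) :: pyAdjA n (ci + 1) :: loopA n k (ci + 1) (s + 2) (-1) := by
        have e1 : ci + s * (-1) = ci - s := by ring
        have e2 : ci - s + (s + 1) = ci + 1 := by ring
        have e3 : s + 1 + 1 = s + 2 := by ring
        show pyAdjA n (ci + s * (-1)) ::
              (pyAdjA n (ci + s * (-1) + (s + 1) * (-(-1))) ::
                loopA n k (ci + s * (-1) + (s + 1) * (-(-1))) (s + 1 + 1) (-(-(-1)))) = _
        norm_num [e1, e2, e3, ← sub_eq_add_neg]
      have h0 : rawOf ci s 0 = ci - s := by unfold rawOf; norm_num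
      have h1' : rawOf ci s 1 = ci + 1 := by unfold rawOf; norm_num
      rw [h1, ih.1 (ci + 1) (s + 2)]
      rw [show k + 1 + 1 = k + 2 from rfl,
        List.range_succ_eq_map, List.range_succ_eq_map]
      simp only [List.map_cons, List.map_map, h0, h1']
      congr 1
      congr 1
      apply List.map_congr_left
      intro j _
      simp [Function.comp, rawOf_shift]
  exact fun m => (key m).1

-- B's slot at position j+1 equals A's raw index at loop position j (from state index, 1)
theorem slot_eq_raw (n index : Int) (j : Nat) :
    slotB n index (j + 1) = pyAdjA n (rawOf index 1 j) := by
  unfold slotB pyAdjA rawOf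
  have h2 : (j + 1) % 2 = 1 - j % 2 := by omega
  have h3 : ((j + 1 + 1) / 2 : Nat) = (j / 2 : Nat) + 1 := by omega
  rcases Nat.even_or_odd j with h | h
  · have hj : j % 2 = 0 := Nat.even_iff.mp h
    simp only [hj, h2, h3]
    norm_num
    have : index - ((j / 2 : Nat) + 1 : Int) = index - 1 - (j / 2 : Nat) := by ring
    split_ifs <;> push_cast at * <;> omega
  · have hj : j % 2 = 1 := Nat.odd_iff.mp h
    simp only [hj, h2, h3]
    norm_num
    split_ifs <;> push_cast at * <;> omega

-- ===== VERDICT (by name: the statement is the Claim_ definition above) =====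
theorem get_sweeping_spec : Claim_equal_get_sweeping := by
  intro vector index interval _
  unfold Spec_get_sweeping get_sweeping get_sweeping_alt
  by_cases hi : index ≥ 0
  · have hi' : ¬ index < 0 := by omega
    simp only [hi, hi', not_true, false_and, if_false, if_true]
    by_cases ht : interval ≥ 0 <;>
      simp [ht, loopA_closed vector.length _ index 1, slot_eq_raw]
  · have hi' : index < 0 := by omega
    by_cases ht : interval ≥ 0
    · simp [hi, hi', ht, show ¬ interval < 0 by omega]
    · simp [hi, hi', ht, show interval < 0 by omega]
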